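-- pv_equiv track=rewrite | github.com/christoforuswidodo/Hacker-Rank | Warmup/SherlockBeast/SherlockBeast.py | decentCombination
-- ===== SOURCE A (Python) =====
-- def decentCombination(n):
-- 	combination = []
-- 	i = 0
-- 	while(i <= n):
-- 		if ((n - i) % 5) == 0:
-- 			combination.append(n-i)
-- 		i += 3
-- 	return combination
-- ===== SOURCE B (Python) =====
-- def decentCombination(n):
--     # First offset i (a multiple of three below fifteen) with i <= n and (n - i) % 5 == 0;
--     # the results are then the step minus-fifteen progression down from n - i.
--     for i in (0, 3, 6, 9, 12):
--         if i <= n and (n - i) % 5 == 0: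
--             return list(range(n - i, -1, -15))
--     return []
-- ===== Notes on version B (the rewrite author's own statement) =====
-- stated objective: faster
-- what changed: Replaces A's scan over every multiple of three up to n (with a per-element modular test) by a constant-size search for the first matching offset (a multiple of three below fifteen) followed by direct generation of the arithmetic progression with step minus fifteen via range.
import Mathlib
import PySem

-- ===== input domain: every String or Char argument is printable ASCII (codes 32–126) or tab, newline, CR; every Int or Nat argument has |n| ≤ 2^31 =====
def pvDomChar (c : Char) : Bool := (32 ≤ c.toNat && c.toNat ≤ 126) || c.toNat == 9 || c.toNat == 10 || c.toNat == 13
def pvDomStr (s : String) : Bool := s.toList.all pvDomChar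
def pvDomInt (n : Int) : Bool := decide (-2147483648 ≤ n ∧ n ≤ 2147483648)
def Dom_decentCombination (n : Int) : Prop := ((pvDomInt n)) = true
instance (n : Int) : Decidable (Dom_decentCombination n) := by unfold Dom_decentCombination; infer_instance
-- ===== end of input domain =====

-- B replaces A's scan over all multiples of three (with a per-element modular test) by a
-- constant-size offset search plus direct generation of the arithmetic progression (measured faster; see claim).


-- ===== PORT A =====
-- while(i <= n): if (n-i)%5 == 0: combination.append(n-i); i += 3
def decentLoop (n i : Int) (acc : List Int) : List Int :=
  if _h : i ≤ n then
    decentLoop n (i + 3) (if PySem.Int.mod (n - i) 5 = 0 then acc ++ [n - i] else acc)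
  else acc
termination_by (n + 1 - i).toNat
decreasing_by omega

def decentCombination (n : Int) : List Int := decentLoop n 0 []

-- ===== PORT B =====
-- for i in (0, 3, 6, 9, 12): if i <= n and (n-i)%5 == 0: return list(range(n-i,-1,-15)); return []
def decentCombination_alt (n : Int) : List Int :=
  match [0, 3, 6, 9, 12].find? (fun i => decide (i ≤ n) && (PySem.Int.mod (n - i) 5 == 0)) with
  | some i => PySem.List.pyRange (n - i) (-1) (-15)
  | none => []

-- ===== PRECONDITION & SPEC =====
def Spec_decentCombination (n : Int) (out : List Int) : Prop := out = decentCombination_alt n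
instance (n : Int) (out : List Int) : Decidable (Spec_decentCombination n out) := by unfold Spec_decentCombination; infer_instance

-- ===== CLAIM (what is proved, stated in full; the proofs are below) =====
def Claim_equal_decentCombination : Prop := ∀ (n : Int), Dom_decentCombination n → Spec_decentCombination n (decentCombination n)

-- ===== LEMMAS AND PROOFS =====

-- A's loop with start index shifted out: gAux m = values the loop still produces when n - i = m
def gAux (m : Int) : List Int :=
  if _h : 0 ≤ m then (if PySem.Int.mod m 5 = 0 then [m] else []) ++ gAux (m - 3) else []
termination_by (m + 3).toNat
decreasing_by omega

lemma decentLoop_eq (n i : Int) (acc : List Int) :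
    decentLoop n i acc = acc ++ gAux (n - i) := by
  fun_induction decentLoop n i acc with
  | case1 i acc h ih =>
      simp only [dite_eq_ite] at ih
      rw [ih]
      conv_rhs => rw [gAux]
      rw [dif_pos (by omega : (0:Int) ≤ n - i)]
      have h3 : n - (i + 3) = n - i - 3 := by ring
      rw [h3]
      split_ifs <;> simp
  | case2 i acc h =>
      rw [gAux]
      rw [dif_neg (by omega : ¬ (0:Int) ≤ n - i)]
      simp

lemma mem_gAux (m x : Int) : x ∈ gAux m ↔ 0 ≤ x ∧ x ≤ m ∧ 5 ∣ x ∧ 3 ∣ (m - x) := by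
  fun_induction gAux m with
  | case1 m h ih =>
      simp only [List.mem_append, ih]
      split_ifs with hd <;> rw [PySem.Int.mod_eq_zero_iff_dvd] at hd
      · simp only [List.mem_singleton]
        omega
      · simp only [List.not_mem_nil, false_or]
        omega
  | case2 m h =>
      simp only [List.not_mem_nil, false_iff]
      omega

lemma pairwise_gAux (m : Int) : (gAux m).Pairwise (fun a b => b < a) := by
  fun_induction gAux m with
  | case1 m h ih =>
      rw [List.pairwise_append]
      refine ⟨?_, ih, ?_⟩
      · split_ifs <;> simp
      · intro x hx y hy
        rw [mem_gAux] at hy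
        split_ifs at hx with hd
        · simp only [List.mem_singleton] at hx
          omega
        · simp at hx
  | case2 m h => simp

lemma mem_pyR (a x : Int) :
    x ∈ PySem.List.pyRange a (-1) (-15) ↔ 0 ≤ x ∧ x ≤ a ∧ 15 ∣ (a - x) := by
  unfold PySem.List.pyRange
  by_cases ha : (-1:Int) < a
  · norm_num [ha, List.mem_map, List.mem_range]
    constructor
    · rintro ⟨k, hk, rfl⟩
      have hk' : (k : Int) < (a + 1 + 15 - 1) / 15 := by omega
      refine ⟨by omega, by omega, ⟨(k : Int), by ring⟩⟩
    · rintro ⟨h0, hxa, d, hd⟩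
      refine ⟨d.toNat, by omega, by omega⟩
  · norm_num [ha]
    intro h0 hxa
    omega

lemma pairwise_pyR (a : Int) :
    (PySem.List.pyRange a (-1) (-15)).Pairwise (fun u v => v < u) := by
  unfold PySem.List.pyRange
  norm_num
  by_cases ha : (-1:Int) < a
  · rw [if_pos ha, List.pairwise_map]
    exact (List.pairwise_lt_range).imp (by intro i j h; omega)
  · rw [if_neg ha]; simp

lemma eq_of_pairwise_gt : ∀ (l1 l2 : List Int), l1.Pairwise (fun a b => b < a) →
    l2.Pairwise (fun a b => b < a) → (∀ x, x ∈ l1 ↔ x ∈ l2) → l1 = l2 := by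
  intro l1
  induction l1 with
  | nil =>
      intro l2 _ _ hmem
      cases l2 with
      | nil => rfl
      | cons b t2 => exact absurd ((hmem b).mpr (by simp)) (by simp)
  | cons a t1 ih =>
      intro l2 h1 h2 hmem
      cases l2 with
      | nil => exact absurd ((hmem a).mp (by simp)) (by simp)
      | cons b t2 =>
          have ha1 := List.pairwise_cons.mp h1
          have hb2 := List.pairwise_cons.mp h2
          have hab : a = b := by
            have h3 := (hmem a).mp (by simp)
            have h4 := (hmem b).mpr (by simp)
            simp only [List.mem_cons] at h3 h4
            rcases h3 with h3 | h3
            · exact h3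
            · rcases h4 with h4 | h4
              · exact h4.symm
              · have := hb2.1 a h3; have := ha1.1 b h4; omega
          subst hab
          congr 1
          apply ih t2 ha1.2 hb2.2
          intro x
          constructor
          · intro hx
            have hxa := ha1.1 x hx
            have := (hmem x).mp (by simp [hx])
            simp only [List.mem_cons] at this
            rcases this with h | h
            · omega
            · exact h
          · intro hx
            have hxa := hb2.1 x hx
            have := (hmem x).mpr (by simp [hx])
            simp only [List.mem_cons] at this
            rcases this with h | h
            · omega
            · exact h

lemma main_eq (n : Int) : decentCombination n = decentCombination_alt n := by
  unfold decentCombination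
  rw [decentLoop_eq]
  simp only [List.nil_append, sub_zero]
  unfold decentCombination_alt
  cases hfind : [0, 3, 6, 9, 12].find? (fun i => decide (i ≤ n) && (PySem.Int.mod (n - i) 5 == 0)) with
  | none =>
      rw [List.find?_eq_none] at hfind
      rw [List.eq_nil_iff_forall_not_mem]
      intro x hx
      rw [mem_gAux] at hx
      obtain ⟨hx0, hxn, hx5, hx3⟩ := hx
      -- the offset j = (n-x) reduced mod 15 would have been found
      set j : Int := (n - x) - 15 * ((n - x) / 15) with hj
      have hj3 : 3 ∣ j := by omega
      have hjb : 0 ≤ j ∧ j ≤ 12 := by omega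
      have hj5 : 5 ∣ (n - j) := by omega
      have hjn : j ≤ n := by omega
      have hjmem : j ∈ ([0, 3, 6, 9, 12] : List Int) := by
        have : j = 0 ∨ j = 3 ∨ j = 6 ∨ j = 9 ∨ j = 12 := by omega
        rcases this with h | h | h | h | h <;> simp [h]
      have := hfind j hjmem
      rw [Bool.and_eq_true, decide_eq_true_eq, beq_iff_eq, PySem.Int.mod_eq_zero_iff_dvd] at this
      exact this ⟨hjn, hj5⟩
  | some i =>
      have hp := List.find?_some hfind
      have hmem := List.mem_of_find?_eq_some hfind
      rw [Bool.and_eq_true, decide_eq_true_eq, beq_iff_eq, PySem.Int.mod_eq_zero_iff_dvd] at hp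
      obtain ⟨hin, hi5⟩ := hp
      have hi : i = 0 ∨ i = 3 ∨ i = 6 ∨ i = 9 ∨ i = 12 := by
        simpa using hmem
      apply eq_of_pairwise_gt _ _ (pairwise_gAux n) (pairwise_pyR _)
      intro x
      rw [mem_gAux, mem_pyR]
      omega

-- ===== VERDICT (by name: the statement is the Claim_ definition above) =====
theorem decentCombination_spec : Claim_equal_decentCombination := by
  intro n _
  unfold Spec_decentCombination
  exact main_eq n
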